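-- pv_equiv track=rewrite | github.com/GAttar-1/capstone_G | app.py | get_latest_completed_exchange
-- ===== SOURCE A (Python) =====
-- def get_latest_completed_exchange(messages):
--     pending_question = messages[-1]["content"] if messages and messages[-1]["role"] == "user" else None
--     for idx in range(len(messages) - 1, -1, -1):
--         msg = messages[idx]
--         if msg.get("role") != "assistant":
--             continue
--         question_text = msg.get("question")
--         if not question_text:
--             for prev_idx in range(idx - 1, -1, -1):
--                 if messages[prev_idx].get("role") == "user":
--                     question_text = messages[prev_idx].get("content", "")
--                     break
--         if pending_question and question_text == pending_question:
--             continue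
--         return question_text or "", msg
--     return "", None
-- ===== SOURCE B (Python) =====
-- def get_latest_completed_exchange(messages):
--     pending_question = messages[-1]["content"] if messages and messages[-1]["role"] == "user" else None
--     # one forward pass: for each assistant message record its effective question text
--     pairs = []
--     last_user_content = ""
--     for msg in messages:
--         role = msg.get("role")
--         if role == "user":
--             last_user_content = msg.get("content", "")
--         elif role == "assistant":
--             pairs.append((msg.get("question") or last_user_content, msg))
--     # pick the newest recorded exchange that is not the still-pending question
--     for question_text, msg in reversed(pairs):
--         if pending_question and question_text == pending_question:
--             continue
--         return question_text, msg
--     return "", None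
-- ===== Notes on version B (the rewrite author's own statement) =====
-- stated objective: alternative
-- what changed: Replaces the backward scan with a nested backward search for the preceding user's content by a single forward pass that precomputes (effective question, message) for every assistant message while tracking the last user content, followed by one backward selection over that index.
import Mathlib
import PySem

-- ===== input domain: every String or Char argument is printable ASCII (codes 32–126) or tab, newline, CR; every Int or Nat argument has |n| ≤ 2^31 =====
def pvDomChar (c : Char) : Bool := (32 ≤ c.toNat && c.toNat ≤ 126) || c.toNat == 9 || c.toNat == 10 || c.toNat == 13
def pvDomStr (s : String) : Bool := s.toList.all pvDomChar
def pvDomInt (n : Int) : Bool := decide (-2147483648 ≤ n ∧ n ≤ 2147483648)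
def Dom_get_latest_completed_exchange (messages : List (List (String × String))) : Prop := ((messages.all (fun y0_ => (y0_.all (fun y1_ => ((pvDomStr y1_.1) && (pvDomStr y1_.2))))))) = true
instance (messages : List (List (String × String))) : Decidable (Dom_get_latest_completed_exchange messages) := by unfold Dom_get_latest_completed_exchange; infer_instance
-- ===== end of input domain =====

-- B replaces A's backward scan with nested backward sub-scans by one forward pass that
-- precomputes each assistant message's effective question, then one backward selection (objective: alternative).

-- dict.get(k) on an association list: first match (shared dict primitive of both ports)
def pvLookup (m : List (String × String)) (k : String) : Option String :=
  (m.find? (fun p => p.1 == k)).map (·.2)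

-- ===== PORT A =====
-- pending_question = messages[-1]["content"] if messages and messages[-1]["role"] == "user" else None
-- (the [] lookups raise KeyError when the key is missing; those inputs are excluded by Pre_)
def pvPendingA (messages : List (List (String × String))) : Option String :=
  match messages.getLast? with
  | none => none
  | some last => if pvLookup last "role" = some "user" then pvLookup last "content" else none

-- `if pending_question and question_text == pending_question` (question_text an Option here)
def pvSkipA (pending : Option String) (qt : Option String) : Bool :=
  match pending with
  | some p => decide (p ≠ "") && decide (qt = some p)
  | none => false

-- inner loop: for prev_idx in range(idx-1,-1,-1): first user's content (default "")
def pvInnerA (messages : List (List (String × String))) : Nat → Option String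
  | 0 => none
  | i + 1 =>
    match messages[i]? with
    | none => none
    | some m =>
      if pvLookup m "role" = some "user" then some ((pvLookup m "content").getD "")
      else pvInnerA messages i

-- outer loop: for idx in range(len(messages)-1,-1,-1), argument i = number of indices left
def pvLoopA (messages : List (List (String × String))) (pending : Option String) :
    Nat → String × Option (List (String × String))
  | 0 => ("", none)
  | i + 1 =>
    match messages[i]? with
    | none => ("", none)
    | some msg =>
      if pvLookup msg "role" ≠ some "assistant" then pvLoopA messages pending i
      else
        let qraw := pvLookup msg "question"
        let qt := if qraw = none ∨ qraw = some "" then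
                    match pvInnerA messages i with
                    | some c => some c
                    | none => qraw
                  else qraw
        if pvSkipA pending qt then pvLoopA messages pending i
        else (qt.getD "", some msg)

def get_latest_completed_exchange (messages : List (List (String × String))) :
    String × (Option (List (String × String))) :=
  pvLoopA messages (pvPendingA messages) messages.length

-- ===== PORT B =====
def pvPendingB (messages : List (List (String × String))) : Option String :=
  match messages.getLast? with
  | none => none
  | some last => if pvLookup last "role" = some "user" then pvLookup last "content" else none

def pvSkipB (pending : Option String) (q : String) : Bool :=
  match pending with
  | some p => decide (p ≠ "") && decide (q = p)
  | none => false

-- forward pass: state = (pairs collected so far, last user content seen)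
def pvStepB (st : List (String × List (String × String)) × String)
    (msg : List (String × String)) : List (String × List (String × String)) × String :=
  let role := pvLookup msg "role"
  if role = some "user" then (st.1, (pvLookup msg "content").getD "")
  else if role = some "assistant" then
    (st.1 ++ [(match pvLookup msg "question" with
               | some s => if s = "" then st.2 else s
               | none => st.2, msg)], st.2)
  else st

-- backward selection over the collected pairs (reversed)
def pvPickB (pending : Option String) :
    List (String × List (String × String)) → String × Option (List (String × String))
  | [] => ("", none)
  | (q, m) :: rest => if pvSkipB pending q then pvPickB pending rest else (q, some m)

def get_latest_completed_exchange_alt (messages : List (List (String × String))) :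
    String × (Option (List (String × String))) :=
  pvPickB (pvPendingB messages) ((messages.foldl pvStepB ([], "")).1).reverse

-- ===== PRECONDITION & SPEC =====
-- Pre_ excludes exactly the inputs where Python A raises KeyError: a nonempty list whose
-- last message lacks "role", or whose last message is a user message lacking "content".
def Pre_get_latest_completed_exchange (messages : List (List (String × String))) : Prop :=
  (match messages.getLast? with
   | none => true
   | some last => (pvLookup last "role").isSome &&
       (!(pvLookup last "role" == some "user") || (pvLookup last "content").isSome)) = true
instance (messages : List (List (String × String))) : Decidable (Pre_get_latest_completed_exchange messages) := by unfold Pre_get_latest_completed_exchange; infer_instance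

def pvWitness_get_latest_completed_exchange : (List (List (String × String))) :=
  [[("role", "user"), ("content", "hi")], [("role", "assistant"), ("content", "yes")]]

def Spec_get_latest_completed_exchange (messages : List (List (String × String))) (out : String × (Option (List (String × String)))) : Prop := out = get_latest_completed_exchange_alt messages
instance (messages : List (List (String × String))) (out : String × (Option (List (String × String)))) : Decidable (Spec_get_latest_completed_exchange messages out) := by unfold Spec_get_latest_completed_exchange; infer_instance

-- ===== CLAIM (what is proved, stated in full; the proofs are below) =====
def Claim_equal_get_latest_completed_exchange : Prop := ∀ (messages : List (List (String × String))), Dom_get_latest_completed_exchange messages → Pre_get_latest_completed_exchange messages → Spec_get_latest_completed_exchange messages (get_latest_completed_exchange messages)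

-- ===== LEMMAS AND PROOFS =====

-- first user message's content (default "") in a newest-first list
def pvFindUserC (l : List (List (String × String))) : Option String :=
  (l.find? (fun m => decide (pvLookup m "role" = some "user"))).map
    (fun m => (pvLookup m "content").getD "")

-- reference backward scan over a newest-first list, fallback question `lu`
def pvGo (pending : Option String) (lu : String) :
    List (List (String × String)) → String × Option (List (String × String))
  | [] => ("", none)
  | m :: rest =>
    if pvLookup m "role" = some "assistant" then
      let q := match pvLookup m "question" with
               | some s => if s = "" then (pvFindUserC rest).getD lu else s
               | none => (pvFindUserC rest).getD lu
      if pvSkipB pending q then pvGo pending lu rest else (q, some m)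
    else pvGo pending lu rest

-- forward collection in recursive form
def pvPairs (lu : String) :
    List (List (String × String)) → List (String × List (String × String))
  | [] => []
  | m :: rest =>
    if pvLookup m "role" = some "user" then pvPairs ((pvLookup m "content").getD "") rest
    else if pvLookup m "role" = some "assistant" then
      (match pvLookup m "question" with
       | some s => if s = "" then lu else s
       | none => lu, m) :: pvPairs lu rest
    else pvPairs lu rest

theorem pvFoldB_fst (msgs : List (List (String × String)))
    (acc : List (String × List (String × String))) (lu : String) :
    (msgs.foldl pvStepB (acc, lu)).1 = acc ++ pvPairs lu msgs := by
  induction msgs generalizing acc lu with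
  | nil => simp [pvPairs]
  | cons m t ih =>
    simp only [List.foldl_cons, pvStepB, pvPairs]
    split_ifs with h1 h2 <;> simp [ih]

theorem pvPickB_append (pending : Option String)
    (ps qs : List (String × List (String × String))) :
    pvPickB pending (ps ++ qs) =
      match pvPickB pending ps with
      | (s, some m) => (s, some m)
      | (_, none) => pvPickB pending qs := by
  induction ps with
  | nil => simp [pvPickB]
  | cons p t ih =>
    obtain ⟨q, m⟩ := p
    simp only [List.cons_append, pvPickB]
    by_cases h : pvSkipB pending q = true
    · simp [h, ih]
    · simp [h]

theorem pvFindUserC_append (l x : List (List (String × String))) :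
    pvFindUserC (l ++ x) = (pvFindUserC l).or (pvFindUserC x) := by
  simp only [pvFindUserC, List.find?_append]
  cases l.find? (fun m => decide (pvLookup m "role" = some "user")) <;> simp

-- appending a user message at the (oldest) end changes the fallback
theorem pvGo_append_user (pending : Option String) (lu : String)
    (l : List (List (String × String))) (x : List (String × String))
    (hx : pvLookup x "role" = some "user") :
    pvGo pending lu (l ++ [x]) = pvGo pending ((pvLookup x "content").getD "") l := by
  induction l with
  | nil => simp [pvGo, hx]
  | cons m t ih =>
    simp only [List.cons_append, pvGo]
    by_cases h : pvLookup m "role" = some "assistant"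
    · simp only [h, pvFindUserC_append, ih]
      have hfx : pvFindUserC [x] = some ((pvLookup x "content").getD "") := by
        simp [pvFindUserC, hx]
      cases hq : pvLookup m "question" with
      | none => cases ht : pvFindUserC t <;> simp [hfx]
      | some s =>
        by_cases hs : s = ""
        · cases ht : pvFindUserC t <;> simp [hs, hfx]
        · simp [hs]
    · simp [h, ih]

-- appending a non-user non-assistant message at the end changes nothing
theorem pvGo_append_other (pending : Option String) (lu : String)
    (l : List (List (String × String))) (x : List (String × String))
    (hxu : ¬ pvLookup x "role" = some "user")
    (hxa : ¬ pvLookup x "role" = some "assistant") :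
    pvGo pending lu (l ++ [x]) = pvGo pending lu l := by
  induction l with
  | nil => simp [pvGo, hxa]
  | cons m t ih =>
    simp only [List.cons_append, pvGo]
    by_cases h : pvLookup m "role" = some "assistant"
    · have hfx : pvFindUserC [x] = none := by simp [pvFindUserC, hxu]
      simp only [h, pvFindUserC_append, hfx, Option.or_none, ih]
    · simp [h, ih]

-- appending an assistant message at the end: tried only if nothing newer matched
theorem pvGo_append_assistant (pending : Option String) (lu : String)
    (l : List (List (String × String))) (x : List (String × String))
    (hx : pvLookup x "role" = some "assistant") :
    pvGo pending lu (l ++ [x]) =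
      match pvGo pending lu l with
      | (s, some m) => (s, some m)
      | (_, none) => pvGo pending lu [x] := by
  induction l with
  | nil => simp [pvGo]
  | cons m t ih =>
    have hxu : ¬ pvLookup x "role" = some "user" := by simp [hx]
    have hfx : pvFindUserC [x] = none := by simp [pvFindUserC, hxu]
    simp only [List.cons_append, pvGo, pvFindUserC_append, hfx, Option.or_none]
    by_cases h : pvLookup m "role" = some "assistant"
    · rw [if_pos h, if_pos h]
      by_cases hsk : pvSkipB pending (match pvLookup m "question" with
               | some s => if s = "" then (pvFindUserC t).getD lu else s
               | none => (pvFindUserC t).getD lu) = true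
      · rw [if_pos hsk, if_pos hsk, ih]
        rcases hgo : pvGo pending lu t with ⟨s, om⟩
        cases om <;> simp [pvGo]
      · rw [if_neg hsk, if_neg hsk]
    · rw [if_neg h, if_neg h, ih]
      rcases hgo : pvGo pending lu t with ⟨s, om⟩
      cases om <;> simp [pvGo]

-- the forward pass + backward selection equals the reference backward scan
theorem pvPick_pairs (pending : Option String) (xs : List (List (String × String)))
    (lu : String) :
    pvPickB pending (pvPairs lu xs).reverse = pvGo pending lu xs.reverse := by
  induction xs generalizing lu with
  | nil => simp [pvPairs, pvPickB, pvGo]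
  | cons x t ih =>
    simp only [pvPairs, List.reverse_cons]
    by_cases hu : pvLookup x "role" = some "user"
    · rw [if_pos hu, ih, pvGo_append_user pending lu t.reverse x hu]
    · by_cases ha : pvLookup x "role" = some "assistant"
      · rw [if_neg hu, if_pos ha, List.reverse_cons, pvPickB_append, ih,
            pvGo_append_assistant pending lu t.reverse x ha]
        cases hgo : pvGo pending lu t.reverse with
        | mk s om =>
          cases om with
          | none =>
            show pvPickB pending [_] = pvGo pending lu [x]
            simp only [pvPickB, pvGo, ha, pvFindUserC]
            simp
          | some m => simp
      · rw [if_neg hu, if_neg ha, ih, pvGo_append_other pending lu t.reverse x hu ha]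

-- A's inner backward scan = first user in the reversed prefix
theorem pvInnerA_eq (messages : List (List (String × String))) (i : Nat)
    (hi : i ≤ messages.length) :
    pvInnerA messages i = pvFindUserC ((messages.take i).reverse) := by
  induction i with
  | zero => simp [pvInnerA, pvFindUserC]
  | succ i ih =>
    have hlt : i < messages.length := Nat.lt_of_succ_le hi
    have hget : messages[i]? = some messages[i] := List.getElem?_eq_getElem hlt
    have htake : messages.take (i + 1) = messages.take i ++ [messages[i]] :=
      List.take_succ_eq_append_getElem hlt
    rw [htake, List.reverse_append, List.reverse_singleton, List.singleton_append]
    simp only [pvInnerA, hget]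
    by_cases h : pvLookup messages[i] "role" = some "user"
    · simp [h, pvFindUserC, List.find?]
    · rw [if_neg h, ih (Nat.le_of_lt hlt)]
      simp only [pvFindUserC, List.find?]
      simp [h]

-- A's outer backward loop = the reference backward scan with fallback ""
theorem pvLoopA_eq (messages : List (List (String × String))) (pending : Option String)
    (i : Nat) (hi : i ≤ messages.length) :
    pvLoopA messages pending i = pvGo pending "" ((messages.take i).reverse) := by
  induction i with
  | zero => simp [pvLoopA, pvGo]
  | succ i ih =>
    have hlt : i < messages.length := Nat.lt_of_succ_le hi
    have hget : messages[i]? = some messages[i] := List.getElem?_eq_getElem hlt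
    have htake : messages.take (i + 1) = messages.take i ++ [messages[i]] :=
      List.take_succ_eq_append_getElem hlt
    rw [htake, List.reverse_append, List.reverse_singleton, List.singleton_append]
    simp only [pvLoopA, hget, pvGo]
    by_cases h : pvLookup messages[i] "role" = some "assistant"
    · rw [if_neg (by simp [h]), if_pos h]
      rw [pvInnerA_eq messages i (Nat.le_of_lt hlt)]
      set fU := pvFindUserC ((messages.take i).reverse) with hfU
      -- identify A's Option-valued question with B's String-valued question
      cases hq : pvLookup messages[i] "question" with
      | none =>
        simp only [hq]
        cases hf : fU with
        | none =>
          have hsk : ∀ p, pvSkipA p none = pvSkipB p "" := by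
            intro p; cases p with
            | none => rfl
            | some s =>
              simp only [pvSkipA, pvSkipB]
              by_cases hs : s = "" <;> simp [hs]
          simp [hsk, ih (Nat.le_of_lt hlt)]
        | some c =>
          have hsk : ∀ p, pvSkipA p (some c) = pvSkipB p c := by
            intro p; cases p with
            | none => rfl
            | some s => simp [pvSkipA, pvSkipB]
          simp [hsk, ih (Nat.le_of_lt hlt)]
      | some s =>
        by_cases hs : s = ""
        · subst hs
          simp only [hq]
          cases hf : fU with
          | none =>
            have hsk : ∀ p, pvSkipA p (some "") = pvSkipB p "" := by
              intro p; cases p with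
              | none => rfl
              | some u =>
                simp only [pvSkipA, pvSkipB]
                by_cases hu : u = "" <;> simp [hu, eq_comm]
            simp [hsk, ih (Nat.le_of_lt hlt)]
          | some c =>
            have hsk : ∀ p, pvSkipA p (some c) = pvSkipB p c := by
              intro p; cases p with
              | none => rfl
              | some u => simp [pvSkipA, pvSkipB]
            simp [hsk, ih (Nat.le_of_lt hlt)]
        · have hsk : ∀ p, pvSkipA p (some s) = pvSkipB p s := by
            intro p; cases p with
            | none => rfl
            | some u => simp [pvSkipA, pvSkipB]
          simp [hs, hsk, ih (Nat.le_of_lt hlt)]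
    · rw [if_pos (by simp [h]), if_neg h, ih (Nat.le_of_lt hlt)]

-- ===== VERDICT (by name: the statement is the Claim_ definition above) =====
theorem get_latest_completed_exchange_spec : Claim_equal_get_latest_completed_exchange := by
  intro messages _ _
  show get_latest_completed_exchange messages = get_latest_completed_exchange_alt messages
  rw [get_latest_completed_exchange, get_latest_completed_exchange_alt,
      pvLoopA_eq messages _ messages.length (Nat.le_refl _), List.take_length,
      pvFoldB_fst, List.nil_append, pvPick_pairs]
  rfl
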